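-- pv_equiv track=rewrite | github.com/harshwardhanpatil-8010/ISRO | app.py | prepare_data_sources
-- ===== SOURCE A (Python) =====
-- from typing import Dict, List, Any, Optional
--
-- def prepare_data_sources(selected_sources: List[str]) -> Dict[str, Any]:
--     """Prepare and validate data sources"""
--     data_sources = {}
--
--     for source in selected_sources:
--         if source == "bhoonidhi":
--             data_sources["elevation"] = "bhoonidhi://dem/srtm"
--             data_sources["land_use"] = "bhoonidhi://landuse/current"
--         elif source == "osm":
--             data_sources["roads"] = "osm://highway/primary,secondary"
--             data_sources["water_bodies"] = "osm://natural/water"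
--         elif source == "stac":
--             data_sources["satellite"] = "stac://sentinel-2/latest"
--
--     return data_sources
-- ===== SOURCE B (Python) =====
-- ENTRIES = {
--     "bhoonidhi": [("elevation", "bhoonidhi://dem/srtm"),
--                   ("land_use", "bhoonidhi://landuse/current")],
--     "osm": [("roads", "osm://highway/primary,secondary"),
--             ("water_bodies", "osm://natural/water")],
--     "stac": [("satellite", "stac://sentinel-2/latest")],
-- }
--
-- def prepare_data_sources(selected_sources):
--     """Prepare and validate data sources.
--
--     Two staged passes instead of incremental dict building: first dedup the
--     recognised sources keeping first-occurrence order (a repeated mention is a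
--     no-op because every mention contributes the same fixed entries), then
--     flatten their entry lists into the result dict (the recognised sources'
--     key sets are pairwise disjoint, so no overwrite can occur)."""
--     seen = []
--     for s in selected_sources:
--         if s in ENTRIES and s not in seen:
--             seen.append(s)
--     return dict(pair for s in seen for pair in ENTRIES[s])
-- ===== Notes on version B (the rewrite author's own statement) =====
-- stated objective: alternative
-- what changed: Instead of growing the result dict per source with overwriting inserts, B first computes the ordered dedup of the recognised sources (first-occurrence order) and then flattens their fixed entry lists into the dict in one final step, which is correct because repeated mentions contribute identical entries and distinct sources have disjoint key sets.
import Mathlib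
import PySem

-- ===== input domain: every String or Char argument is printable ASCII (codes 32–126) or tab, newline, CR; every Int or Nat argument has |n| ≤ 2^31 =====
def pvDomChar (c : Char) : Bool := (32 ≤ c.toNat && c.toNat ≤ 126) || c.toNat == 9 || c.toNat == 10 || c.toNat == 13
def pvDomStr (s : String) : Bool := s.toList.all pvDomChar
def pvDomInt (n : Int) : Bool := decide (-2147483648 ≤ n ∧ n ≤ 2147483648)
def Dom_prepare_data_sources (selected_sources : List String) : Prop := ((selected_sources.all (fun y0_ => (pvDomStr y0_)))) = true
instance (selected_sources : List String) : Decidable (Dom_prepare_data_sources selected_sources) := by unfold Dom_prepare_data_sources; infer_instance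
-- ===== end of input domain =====

-- B replaces A's incremental dict building by an ordered dedup of the recognised
-- sources followed by one flatten into the dict; return value only, no side effects.

-- ===== PORT A =====
def prepare_data_sources (selected_sources : List String) : List (String × String) :=
  (selected_sources.foldl (fun (data_sources : PySem.Dict String String) source =>
    if source == "bhoonidhi" then
      (data_sources.insert "elevation" "bhoonidhi://dem/srtm").insert "land_use" "bhoonidhi://landuse/current"
    else if source == "osm" then
      (data_sources.insert "roads" "osm://highway/primary,secondary").insert "water_bodies" "osm://natural/water"
    else if source == "stac" then
      data_sources.insert "satellite" "stac://sentinel-2/latest"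
    else data_sources) PySem.Dict.empty).items

-- ===== PORT B =====
-- ENTRIES: the fixed (key, uri) contribution of each recognised source
def pvENTRIES : PySem.Dict String (List (String × String)) :=
  PySem.Dict.ofList
    [("bhoonidhi", [("elevation", "bhoonidhi://dem/srtm"), ("land_use", "bhoonidhi://landuse/current")]),
     ("osm", [("roads", "osm://highway/primary,secondary"), ("water_bodies", "osm://natural/water")]),
     ("stac", [("satellite", "stac://sentinel-2/latest")])]

def prepare_data_sources_alt (selected_sources : List String) : List (String × String) :=
  let seen := selected_sources.foldl
    (fun (seen : List String) s =>
      if pvENTRIES.contains s && !seen.contains s then seen ++ [s] else seen) []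
  (PySem.Dict.ofList (seen.flatMap (fun s => pvENTRIES.getD s []))).items

-- ===== PRECONDITION & SPEC =====
def Spec_prepare_data_sources (selected_sources : List String) (out : List (String × String)) : Prop := out = prepare_data_sources_alt selected_sources
instance (selected_sources : List String) (out : List (String × String)) : Decidable (Spec_prepare_data_sources selected_sources out) := by unfold Spec_prepare_data_sources; infer_instance

-- ===== CLAIM (what is proved, stated in full; the proofs are below) =====
def Claim_equal_prepare_data_sources : Prop := ∀ (selected_sources : List String), Dom_prepare_data_sources selected_sources → Spec_prepare_data_sources selected_sources (prepare_data_sources selected_sources)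

-- ===== LEMMAS AND PROOFS =====

-- proof-local names for B's per-source entry list and the two loop bodies
def pvE (s : String) : List (String × String) := pvENTRIES.getD s []

def pvAstep (d : PySem.Dict String String) (s : String) : PySem.Dict String String :=
  if s == "bhoonidhi" then
    (d.insert "elevation" "bhoonidhi://dem/srtm").insert "land_use" "bhoonidhi://landuse/current"
  else if s == "osm" then
    (d.insert "roads" "osm://highway/primary,secondary").insert "water_bodies" "osm://natural/water"
  else if s == "stac" then
    d.insert "satellite" "stac://sentinel-2/latest"
  else d

def pvBstep (seen : List String) (s : String) : List String :=
  if pvENTRIES.contains s && !seen.contains s then seen ++ [s] else seen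

theorem pvENTRIES_mk : pvENTRIES = PySem.Dict.mk
    [("bhoonidhi", [("elevation", "bhoonidhi://dem/srtm"), ("land_use", "bhoonidhi://landuse/current")]),
     ("osm", [("roads", "osm://highway/primary,secondary"), ("water_bodies", "osm://natural/water")]),
     ("stac", [("satellite", "stac://sentinel-2/latest")])] := by decide

theorem pvE_b : pvE "bhoonidhi" = [("elevation", "bhoonidhi://dem/srtm"), ("land_use", "bhoonidhi://landuse/current")] := by decide

theorem pvE_o : pvE "osm" = [("roads", "osm://highway/primary,secondary"), ("water_bodies", "osm://natural/water")] := by decide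

theorem pvE_s : pvE "stac" = [("satellite", "stac://sentinel-2/latest")] := by decide

theorem pvE_none (s : String) (h1 : s ≠ "bhoonidhi") (h2 : s ≠ "osm") (h3 : s ≠ "stac") :
    pvE s = [] := by
  rw [pvE, pvENTRIES_mk, PySem.Dict.getD_eq_get?_getD]
  simp [beq_iff_eq, Ne.symm h1, Ne.symm h2, Ne.symm h3, PySem.Dict.get?]

theorem pvContains_eq (s : String) :
    pvENTRIES.contains s = (s == "bhoonidhi" || s == "osm" || s == "stac") := by
  rw [pvENTRIES_mk]
  simp [PySem.Dict.contains_mk, Bool.beq_comm, Bool.or_assoc]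

-- each key occurring in pvE s determines s
theorem pvE_key_unique (s t k : String) (hs : k ∈ (pvE s).map Prod.fst)
    (ht : k ∈ (pvE t).map Prod.fst) : s = t := by
  by_cases h1 : s = "bhoonidhi" <;> by_cases h2 : s = "osm" <;> by_cases h3 : s = "stac" <;>
    by_cases g1 : t = "bhoonidhi" <;> by_cases g2 : t = "osm" <;> by_cases g3 : t = "stac" <;>
    subst_vars <;>
    simp_all [pvE_b, pvE_o, pvE_s, pvE_none] <;>
    rcases hs with rfl | rfl <;> simp_all

-- pairs of pvE with equal keys are equal
theorem pvE_pair_unique (s t : String) (p q : String × String) (hp : p ∈ pvE s)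
    (hq : q ∈ pvE t) (hk : p.1 = q.1) : p = q := by
  have hst : s = t := pvE_key_unique s t p.1 (List.mem_map_of_mem hp)
    (by rw [hk]; exact List.mem_map_of_mem hq)
  subst hst
  by_cases h1 : s = "bhoonidhi" <;> by_cases h2 : s = "osm" <;> by_cases h3 : s = "stac" <;>
    subst_vars <;>
    simp_all [pvE_b, pvE_o, pvE_s, pvE_none] <;>
    rcases hp with rfl | rfl <;> rcases hq with hq | hq <;> simp_all

theorem pvE_keys_nodup (s : String) : ((pvE s).map Prod.fst).Nodup := by
  by_cases h1 : s = "bhoonidhi"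
  · subst h1; decide
  · by_cases h2 : s = "osm"
    · subst h2; decide
    · by_cases h3 : s = "stac"
      · subst h3; decide
      · rw [pvE_none s h1 h2 h3]; simp

theorem pv_flat_keys_nodup (seen : List String) (h : seen.Nodup) :
    ((seen.flatMap pvE).map Prod.fst).Nodup := by
  induction seen with
  | nil => simp
  | cons s rest ih =>
    rcases List.nodup_cons.mp h with ⟨hs, hrest⟩
    simp only [List.flatMap_cons, List.map_append, List.nodup_append]
    refine ⟨pvE_keys_nodup s, ih hrest, ?_⟩
    intro k hk1 k' hk2
    obtain ⟨p, hp2, rfl⟩ := List.mem_map.mp hk2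
    obtain ⟨t, ht, hpt⟩ := List.mem_flatMap.mp hp2
    exact fun heq => hs ((pvE_key_unique s t _ (heq ▸ hk1) (List.mem_map_of_mem hpt)) ▸ ht)

-- keys of an unseen source are absent from the accumulated pairs
theorem pv_key_not_in (seen : List String) (s k : String) (hk : k ∈ (pvE s).map Prod.fst)
    (hs : s ∉ seen) : k ∉ (seen.flatMap pvE).map Prod.fst := by
  intro hmem
  obtain ⟨p, hp2, rfl⟩ := List.mem_map.mp hmem
  obtain ⟨t, ht, hpt⟩ := List.mem_flatMap.mp hp2
  exact hs ((pvE_key_unique s t _ hk (List.mem_map_of_mem hpt)) ▸ ht)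

-- inserting an already-present (k, v) pair leaves the dict unchanged
theorem pv_insert_present (seen : List String) (s : String) (p : String × String)
    (hs : s ∈ seen) (hp : p ∈ pvE s) :
    (PySem.Dict.mk (seen.flatMap pvE)).insert p.1 p.2 = PySem.Dict.mk (seen.flatMap pvE) := by
  have hcont : (PySem.Dict.mk (seen.flatMap pvE)).contains p.1 = true := by
    simp [PySem.Dict.contains_mk]
    exact ⟨s, hs, p.2, by simpa using hp⟩
  apply PySem.Dict.ext
  simp only [PySem.Dict.items_insert, hcont, if_true]
  show (seen.flatMap pvE).map _ = seen.flatMap pvE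
  rw [show seen.flatMap pvE = (seen.flatMap pvE).map id by simp]
  rw [List.map_map]
  apply List.map_congr_left
  intro q hq
  simp only [List.mem_flatMap] at hq
  rcases hq with ⟨t, _, hqt⟩
  simp only [Function.comp_apply, id]
  by_cases hkk : q.1 = p.1
  · have := pvE_pair_unique t s q p hqt hp hkk
    simp [this]
  · simp [hkk]

-- inserting a fresh key appends
theorem pv_insert_fresh (d : PySem.Dict String String) (k v : String)
    (h : k ∉ d.items.map Prod.fst) : d.insert k v = PySem.Dict.mk (d.items ++ [(k, v)]) := by
  apply PySem.Dict.ext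
  rw [PySem.Dict.items_insert_of_not_contains]
  simp [PySem.Dict.contains_eq_decide_mem_keys, PySem.Dict.keys, h]

-- the two loop bodies agree on the flatMap representation
theorem pv_step (seen : List String) (s : String) :
    pvAstep (PySem.Dict.mk (seen.flatMap pvE)) s = PySem.Dict.mk ((pvBstep seen s).flatMap pvE) := by
  by_cases hmem : s ∈ seen
  · -- already seen: every insert hits an existing identical pair; B keeps seen
    have hc : seen.contains s = true := by simpa using hmem
    have hB : pvBstep seen s = seen := by
      unfold pvBstep; rw [hc]; simp
    rw [hB]
    by_cases h1 : s = "bhoonidhi"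
    · subst h1
      simp only [pvAstep, String.reduceBEq, Bool.false_eq_true, if_false, if_true]
      rw [pv_insert_present seen "bhoonidhi" ("elevation", "bhoonidhi://dem/srtm") hmem (by decide),
        pv_insert_present seen "bhoonidhi" ("land_use", "bhoonidhi://landuse/current") hmem (by decide)]
    · by_cases h2 : s = "osm"
      · subst h2
        simp only [pvAstep, String.reduceBEq, Bool.false_eq_true, if_false, if_true]
        rw [pv_insert_present seen "osm" ("roads", "osm://highway/primary,secondary") hmem (by decide),
          pv_insert_present seen "osm" ("water_bodies", "osm://natural/water") hmem (by decide)]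
      · by_cases h3 : s = "stac"
        · subst h3
          simp only [pvAstep, String.reduceBEq, Bool.false_eq_true, if_false, if_true]
          rw [pv_insert_present seen "stac" ("satellite", "stac://sentinel-2/latest") hmem (by decide)]
        · simp [pvAstep, h1, h2, h3]
  · -- unseen: recognised sources append their entries; others are no-ops
    by_cases h1 : s = "bhoonidhi"
    · subst h1
      have hB : pvBstep seen "bhoonidhi" = seen ++ ["bhoonidhi"] := by
        simp [pvBstep, pvContains_eq, hmem]
      rw [hB]
      simp only [pvAstep, String.reduceBEq, Bool.false_eq_true, if_false, if_true]
      rw [pv_insert_fresh (PySem.Dict.mk (seen.flatMap pvE)) "elevation" _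
        (pv_key_not_in seen "bhoonidhi" _ (by decide) hmem)]
      rw [pv_insert_fresh _ "land_use" _ (by
        intro h
        simp only [List.map_append] at h
        rcases List.mem_append.mp h with h | h
        · exact pv_key_not_in seen "bhoonidhi" _ (by decide) hmem h
        · simp at h)]
      apply PySem.Dict.ext
      show (seen.flatMap pvE) ++ _ ++ _ = _
      rw [List.flatMap_append]
      simp [pvE_b]
    · by_cases h2 : s = "osm"
      · subst h2
        have hB : pvBstep seen "osm" = seen ++ ["osm"] := by
          simp [pvBstep, pvContains_eq, hmem]
        rw [hB]
        simp only [pvAstep, String.reduceBEq, Bool.false_eq_true, if_false, if_true]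
        rw [pv_insert_fresh (PySem.Dict.mk (seen.flatMap pvE)) "roads" _
          (pv_key_not_in seen "osm" _ (by decide) hmem)]
        rw [pv_insert_fresh _ "water_bodies" _ (by
          intro h
          simp only [List.map_append] at h
          rcases List.mem_append.mp h with h | h
          · exact pv_key_not_in seen "osm" _ (by decide) hmem h
          · simp at h)]
        apply PySem.Dict.ext
        show (seen.flatMap pvE) ++ _ ++ _ = _
        rw [List.flatMap_append]
        simp [pvE_o]
      · by_cases h3 : s = "stac"
        · subst h3
          have hB : pvBstep seen "stac" = seen ++ ["stac"] := by
            simp [pvBstep, pvContains_eq, hmem]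
          rw [hB]
          simp only [pvAstep, String.reduceBEq, Bool.false_eq_true, if_false, if_true]
          rw [pv_insert_fresh (PySem.Dict.mk (seen.flatMap pvE)) "satellite" _
            (pv_key_not_in seen "stac" _ (by decide) hmem)]
          apply PySem.Dict.ext
          show (seen.flatMap pvE) ++ _ = _
          rw [List.flatMap_append]
          simp [pvE_s]
        · have hB : pvBstep seen s = seen := by
            simp [pvBstep, pvContains_eq, h1, h2, h3]
          rw [hB]
          simp [pvAstep, h1, h2, h3]

-- B's seen list stays Nodup through the loop
theorem pv_seen_nodup (l seen : List String) (h : seen.Nodup) :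
    (l.foldl pvBstep seen).Nodup := by
  induction l generalizing seen with
  | nil => simpa
  | cons s rest ih =>
    apply ih
    unfold pvBstep
    split
    · rename_i hc
      simp only [Bool.and_eq_true, Bool.not_eq_true'] at hc
      refine List.Nodup.append h (by simp) ?_
      intro x hx hxs
      simp only [List.mem_singleton] at hxs
      subst hxs
      have : x ∉ seen := by simpa using hc.2
      exact this hx
    · exact h

-- main invariant: A's dict over l from seen's flatten equals the flatten of B's seen
theorem pv_main (l seen : List String) :
    l.foldl pvAstep (PySem.Dict.mk (seen.flatMap pvE))
      = PySem.Dict.mk ((l.foldl pvBstep seen).flatMap pvE) := by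
  induction l generalizing seen with
  | nil => rfl
  | cons s rest ih =>
    simp only [List.foldl_cons, pv_step seen s]
    exact ih (pvBstep seen s)

-- ===== VERDICT (by name: the statement is the Claim_ definition above) =====
theorem prepare_data_sources_spec : Claim_equal_prepare_data_sources := by
  intro selected_sources _
  unfold Spec_prepare_data_sources prepare_data_sources prepare_data_sources_alt
  have hA : selected_sources.foldl
      (fun (data_sources : PySem.Dict String String) source =>
        if source == "bhoonidhi" then
          (data_sources.insert "elevation" "bhoonidhi://dem/srtm").insert "land_use" "bhoonidhi://landuse/current"
        else if source == "osm" then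
          (data_sources.insert "roads" "osm://highway/primary,secondary").insert "water_bodies" "osm://natural/water"
        else if source == "stac" then
          data_sources.insert "satellite" "stac://sentinel-2/latest"
        else data_sources) PySem.Dict.empty
      = selected_sources.foldl pvAstep (PySem.Dict.mk (([] : List String).flatMap pvE)) := rfl
  rw [hA, pv_main]
  have hnd := pv_seen_nodup selected_sources [] (by simp)
  have hfresh := PySem.Dict.items_foldl_insert_fresh
    (l := (selected_sources.foldl pvBstep []).flatMap pvE)
    (k := Prod.fst) (v := Prod.snd) (d := (PySem.Dict.empty : PySem.Dict String String))
    (by simp [PySem.Dict.contains_empty]) (pv_flat_keys_nodup _ hnd)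
  show ((selected_sources.foldl pvBstep []).flatMap pvE)
      = (PySem.Dict.ofList ((selected_sources.foldl pvBstep []).flatMap (fun s => pvENTRIES.getD s []))).items
  rw [show (fun s => pvENTRIES.getD s []) = pvE from rfl]
  rw [show (PySem.Dict.ofList ((selected_sources.foldl pvBstep []).flatMap pvE)).items
      = ((selected_sources.foldl pvBstep []).flatMap pvE) by simpa [PySem.Dict.ofList] using hfresh]
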